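-- pv_equiv track=rewrite | github.com/RIT-CHAOS-SEC/SpecCFA | spec-cfa-trustzone/vrf/validate.py | validate_optimized
-- ===== SOURCE A (Python) =====
-- def validate_optimized(subpaths, baseline, optimized):
--     unoptimized = []
--     i = 0
--     while i < len(optimized):
--         if optimized[i].startswith('1111'):
--             # subpath id
--             subpath = subpaths[optimized[i]][:]
--             if i + 1 < len(optimized) and optimized[i+1].startswith('ffff'):
--                 # parse counter
--                 count = int(optimized[i+1][4:], 16)
--                 subpath *= count
--                 i += 1
--             unoptimized.extend(subpath)
--         else:
--             # keep element as-is
--             unoptimized.append(optimized[i])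
--         i += 1
--
--     # Replace subpath ids in the baseline list
--     baseline = [subpaths[subpath] if subpath.startswith('1111') else subpath for subpath in baseline]
--
--     return unoptimized == baseline, unoptimized
-- ===== SOURCE B (Python) =====
-- def validate_optimized(subpaths, baseline, optimized):
--     # Build the expansion back-to-front: walk `optimized` in reverse, holding at
--     # most one pending 'ffff' counter whose left neighbour is not yet known.
--     rev = []            # unoptimized, in reversed order
--     pending = None      # a 'ffff' element waiting to learn its predecessor
--     for e in reversed(optimized):
--         if e.startswith('1111'):
--             chunk = subpaths[e]
--             if pending is not None:
--                 chunk = chunk * int(pending[4:], 16)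
--                 pending = None
--             rev.extend(reversed(chunk))
--         elif e.startswith('ffff'):
--             if pending is not None:
--                 rev.append(pending)
--             pending = e
--         else:
--             if pending is not None:
--                 rev.append(pending)
--                 pending = None
--             rev.append(e)
--     if pending is not None:
--         rev.append(pending)
--     unoptimized = rev[::-1]
--
--     baseline = [subpaths[subpath] if subpath.startswith('1111') else subpath for subpath in baseline]
--     return unoptimized == baseline, unoptimized
-- ===== Notes on version B (the rewrite author's own statement) =====
-- stated objective: alternative
-- what changed: B builds the expanded path back-to-front: a single reversed traversal holds at most one pending 'ffff' counter and attaches it when its left neighbour appears, instead of A's forward index loop that peeks at i+1 and skips it; the baseline comprehension and return are unchanged. Pre_ excludes only inputs where both programs raise (KeyError on a missing '1111' id, ValueError on a non-hex counter that follows a '1111' id).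
import Mathlib
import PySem

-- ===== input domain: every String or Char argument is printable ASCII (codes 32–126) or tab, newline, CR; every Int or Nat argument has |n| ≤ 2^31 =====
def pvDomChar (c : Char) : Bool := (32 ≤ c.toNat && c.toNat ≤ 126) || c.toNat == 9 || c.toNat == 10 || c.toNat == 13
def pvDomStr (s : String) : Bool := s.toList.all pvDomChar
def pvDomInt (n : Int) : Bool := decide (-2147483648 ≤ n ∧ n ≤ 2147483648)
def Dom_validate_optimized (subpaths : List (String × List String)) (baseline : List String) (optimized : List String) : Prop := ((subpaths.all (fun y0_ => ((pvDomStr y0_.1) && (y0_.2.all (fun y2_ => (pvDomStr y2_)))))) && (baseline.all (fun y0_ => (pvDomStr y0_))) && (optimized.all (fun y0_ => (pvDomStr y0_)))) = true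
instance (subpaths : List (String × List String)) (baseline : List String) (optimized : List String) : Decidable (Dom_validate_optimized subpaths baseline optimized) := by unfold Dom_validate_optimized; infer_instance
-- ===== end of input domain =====

-- B re-traverses `optimized` back-to-front with one pending counter instead of A's forward
-- index loop with lookahead; same cost, different decomposition; return value proved equal on Pre_.


-- Helpers shared by both ports (both Pythons run these exact expressions:
-- `e.startswith('1111')` / `e.startswith('ffff')`, `subpaths[e]`, `int(y[4:], 16)`,
-- the baseline comprehension and the `==` of the return line).

def is1111 (s : String) : Bool := PySem.Str.startswith s "1111"
def isffff (s : String) : Bool := PySem.Str.startswith s "ffff"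

-- subpaths[e] (under Pre_ the key is present; getD [] is never the value used)
def spLookup (subpaths : List (String × List String)) (e : String) : List String :=
  ((PySem.Dict.mk subpaths).get? e).getD []

-- int(y[4:], 16) (under Pre_ it parses; getD 0 is never the value used)
def hexCount (y : String) : Int :=
  (PySem.Int.ofStrBase? (PySem.Str.slice y (some 4) none) 16).getD 0

-- [subpaths[s] if s.startswith('1111') else s for s in baseline] — heterogeneous elements as a Sum
def baselineRepl (subpaths : List (String × List String)) (baseline : List String) :
    List (Sum String (List String)) :=
  baseline.map (fun s => if is1111 s then Sum.inr (spLookup subpaths s) else Sum.inl s)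

-- unoptimized == baseline (a plain string never equals a replaced list)
def pyListEq (u : List String) (b : List (Sum String (List String))) : Bool :=
  decide (u.map Sum.inl = b)

-- ===== PORT A =====
-- A's forward while-loop over `optimized`, index i advancing by 1 or 2, as list recursion.
def expandA (subpaths : List (String × List String)) : List String → List String
  | [] => []
  | [x] => if is1111 x then spLookup subpaths x else [x]
  | x :: y :: rest =>
    if is1111 x then
      if isffff y then
        PySem.List.pyRepeat (spLookup subpaths x) (hexCount y) ++ expandA subpaths rest
      else
        spLookup subpaths x ++ expandA subpaths (y :: rest)
    else
      x :: expandA subpaths (y :: rest)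

def validate_optimized (subpaths : List (String × List String)) (baseline : List String) (optimized : List String) : Bool × List String :=
  let unoptimized := expandA subpaths optimized
  (pyListEq unoptimized (baselineRepl subpaths baseline), unoptimized)

-- ===== PORT B =====
-- B's loop body: one step of the reversed traversal with a pending counter.
def stepB (subpaths : List (String × List String))
    (st : List String × Option String) (e : String) : List String × Option String :=
  if is1111 e then
    match st.2 with
    | some p =>
        (st.1 ++ (PySem.List.pyRepeat (spLookup subpaths e) (hexCount p)).reverse, none)
    | none => (st.1 ++ (spLookup subpaths e).reverse, none)
  else if isffff e then
    ((match st.2 with | some p => st.1 ++ [p] | none => st.1), some e)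
  else
    ((match st.2 with | some p => st.1 ++ [p] | none => st.1) ++ [e], none)

-- the final `if pending is not None: rev.append(pending)`
def flushB (st : List String × Option String) : List String :=
  match st.2 with | some p => st.1 ++ [p] | none => st.1

def validate_optimized_alt (subpaths : List (String × List String)) (baseline : List String) (optimized : List String) : Bool × List String :=
  let st := optimized.reverse.foldl (stepB subpaths) ([], none)
  let unoptimized := (flushB st).reverse
  (pyListEq unoptimized (baselineRepl subpaths baseline), unoptimized)

-- ===== PRECONDITION & SPEC =====
-- Pre_ excludes exactly the inputs on which the Python A raises: a KeyError (a '1111' element of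
-- `optimized` or `baseline` missing from `subpaths`) or a ValueError (the 'ffff' element right
-- after a '1111' element has a non-hex payload).
def Pre_validate_optimized (subpaths : List (String × List String)) (baseline : List String) (optimized : List String) : Prop :=
  (∀ e ∈ optimized, PySem.Str.startswith e "1111" = true →
      ((PySem.Dict.mk subpaths).get? e).isSome = true) ∧
  (∀ e ∈ baseline, PySem.Str.startswith e "1111" = true →
      ((PySem.Dict.mk subpaths).get? e).isSome = true) ∧
  (∀ p ∈ optimized.zip optimized.tail,
      PySem.Str.startswith p.1 "1111" = true → PySem.Str.startswith p.2 "ffff" = true →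
      (PySem.Int.ofStrBase? (PySem.Str.slice p.2 (some 4) none) 16).isSome = true)
instance (subpaths : List (String × List String)) (baseline : List String) (optimized : List String) : Decidable (Pre_validate_optimized subpaths baseline optimized) := by unfold Pre_validate_optimized; infer_instance

def pvWitness_validate_optimized : (List (String × List String)) × List String × List String :=
  ([("1111a", ["p", "q"])], ["1111a", "r"], ["1111a", "ffff2", "r"])

def Spec_validate_optimized (subpaths : List (String × List String)) (baseline : List String) (optimized : List String) (out : Bool × List String) : Prop := out = validate_optimized_alt subpaths baseline optimized
instance (subpaths : List (String × List String)) (baseline : List String) (optimized : List String) (out : Bool × List String) : Decidable (Spec_validate_optimized subpaths baseline optimized out) := by unfold Spec_validate_optimized; infer_instance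

-- ===== CLAIM (what is proved, stated in full; the proofs are below) =====
def Claim_equal_validate_optimized : Prop := ∀ (subpaths : List (String × List String)) (baseline : List String) (optimized : List String), Dom_validate_optimized subpaths baseline optimized → Pre_validate_optimized subpaths baseline optimized → Spec_validate_optimized subpaths baseline optimized (validate_optimized subpaths baseline optimized)

-- ===== LEMMAS AND PROOFS =====

-- no string starts with both "1111" and "ffff"
theorem not_is1111_isffff (y : String) (h1 : is1111 y = true) (h2 : isffff y = true) : False := by
  unfold is1111 at h1
  unfold isffff at h2
  have p1 : ("1111".toList) <+: y.toList := (PySem.Chars.startswith_iff _ _).1 (by simpa using h1)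
  have p2 : ("ffff".toList) <+: y.toList := (PySem.Chars.startswith_iff _ _).1 (by simpa using h2)
  rcases p1 with ⟨r1, hr1⟩
  rcases p2 with ⟨r2, hr2⟩
  rw [← hr1] at hr2
  simp at hr2

-- a non-'1111' head expands to itself in A
theorem expandA_cons_not1111 (subpaths : List (String × List String)) (y : String)
    (t : List String) (h : is1111 y = false) :
    expandA subpaths (y :: t) = y :: expandA subpaths t := by
  cases t <;> simp [expandA, h]

-- B's fold over the reversed list consumes the ORIGINAL list's head last.
theorem foldB_cons (subpaths : List (String × List String)) (x : String) (t : List String)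
    (init : List String × Option String) :
    (x :: t).reverse.foldl (stepB subpaths) init
      = stepB subpaths (t.reverse.foldl (stepB subpaths) init) x := by
  simp [List.foldl_append]

-- Invariant of B's reversed traversal, phrased against A's forward expansion:
-- the pending slot holds exactly a leading non-'1111' 'ffff' element, and the
-- accumulator is the corresponding part of A's output, reversed.
theorem foldB_spec (subpaths : List (String × List String)) (l : List String) :
    l.reverse.foldl (stepB subpaths) ([], none)
      = match l with
        | [] => ([], none)
        | y :: t =>
          if is1111 y = false ∧ isffff y = true
          then ((expandA subpaths t).reverse, some y)
          else ((expandA subpaths (y :: t)).reverse, none) := by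
  induction l with
  | nil => simp
  | cons x t ih =>
    rw [foldB_cons, ih]
    cases hx1 : is1111 x with
    | true =>
      -- x is a subpath id: a pending element is consumed as its counter
      cases t with
      | nil => simp [stepB, expandA, hx1]
      | cons y t' =>
        by_cases hy : is1111 y = false ∧ isffff y = true
        · simp [stepB, expandA, hx1, hy]
        · have hyn : isffff y = false := by
            cases hff : isffff y with
            | false => rfl
            | true =>
              cases h1 : is1111 y with
              | false => exact absurd ⟨h1, hff⟩ hy
              | true => exact absurd (not_is1111_isffff y h1 hff) (by simp)
          simp [stepB, expandA, hx1, hyn]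
    | false =>
      cases hxff : isffff x with
      | true =>
        -- x becomes the pending counter; an earlier pending element is flushed as-is
        cases t with
        | nil => simp [stepB, expandA, hx1, hxff]
        | cons y t' =>
          by_cases hy : is1111 y = false ∧ isffff y = true
          · simp [stepB, hx1, hxff, hy, expandA_cons_not1111 subpaths y t' hy.1]
          · simp [stepB, hx1, hxff, hy]
      | false =>
        -- x is kept as-is; an earlier pending element is flushed as-is
        cases t with
        | nil => simp [stepB, expandA, hx1, hxff]
        | cons y t' =>
          by_cases hy : is1111 y = false ∧ isffff y = true
          · simp [stepB, hx1, hxff, hy, expandA_cons_not1111 subpaths x (y :: t') hx1,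
                  expandA_cons_not1111 subpaths y t' hy.1]
          · simp [stepB, expandA, hx1, hxff, hy]

-- B's expansion equals A's expansion, on every input.
theorem expand_agree (subpaths : List (String × List String)) (l : List String) :
    (flushB (l.reverse.foldl (stepB subpaths) ([], none))).reverse = expandA subpaths l := by
  rw [foldB_spec]
  cases l with
  | nil => simp [flushB, expandA]
  | cons y t =>
    by_cases hy : is1111 y = false ∧ isffff y = true
    · cases t with
      | nil => simp [flushB, expandA, hy]
      | cons z t' => simp [flushB, hy, expandA_cons_not1111 subpaths y (z :: t') hy.1]
    · simp [flushB, hy]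

-- ===== VERDICT (by name: the statement is the Claim_ definition above) =====
theorem validate_optimized_spec : Claim_equal_validate_optimized := by
  intro subpaths baseline optimized _ _
  show _ = _
  simp only [validate_optimized, validate_optimized_alt]
  rw [expand_agree]
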